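-- pv_equiv track=rewrite | github.com/kiranmghub/pos-stack | pos-backend/catalog/api_import_export.py | _dynamic_headers
-- ===== SOURCE A (Python) =====
-- from typing import Dict, List, Tuple, Any, Optional
--
-- def _dynamic_headers(rows: List[Dict[str, Any]], base: List[str]) -> List[str]:
--     """Return base headers + any new keys encountered in rows, preserving order."""
--     seen = set(base)
--     out = list(base)
--     for r in rows:
--         for k in r.keys():
--             if k not in seen:
--                 seen.add(k)
--                 out.append(k)
--     return out
-- ===== SOURCE B (Python) =====
-- from typing import Dict, List, Any
--
-- def _dynamic_headers(rows: List[Dict[str, Any]], base: List[str]) -> List[str]: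
--     """Base headers + new keys ordered by first occurrence: collect the key stream,
--     take the set difference with base, and sort it by first-occurrence index."""
--     flat = [k for r in rows for k in r]
--     new = set(flat).difference(base)
--     return list(base) + sorted(new, key=flat.index)
-- ===== Notes on version B (the rewrite author's own statement) =====
-- stated objective: alternative
-- what changed: Instead of one interleaved seen-set pass appending unseen keys, B collects the whole key stream, takes the set difference with base, and recovers first-occurrence order by sorting the new keys by their first index in the stream (sort-by-index vs sequential dedup).
import Mathlib
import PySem

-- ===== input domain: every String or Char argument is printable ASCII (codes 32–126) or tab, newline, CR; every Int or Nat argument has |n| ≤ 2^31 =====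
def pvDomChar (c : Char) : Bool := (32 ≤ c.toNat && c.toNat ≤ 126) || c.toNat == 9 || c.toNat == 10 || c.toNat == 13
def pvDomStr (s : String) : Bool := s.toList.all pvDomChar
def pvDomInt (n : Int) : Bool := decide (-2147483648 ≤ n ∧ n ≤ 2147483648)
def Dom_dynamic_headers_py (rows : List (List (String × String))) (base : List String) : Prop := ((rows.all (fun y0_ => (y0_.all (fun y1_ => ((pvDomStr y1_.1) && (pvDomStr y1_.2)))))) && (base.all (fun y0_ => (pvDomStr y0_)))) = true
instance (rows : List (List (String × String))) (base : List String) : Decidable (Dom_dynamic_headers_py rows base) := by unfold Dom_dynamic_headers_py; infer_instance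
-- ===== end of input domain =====

-- B replaces A's single interleaved seen-set pass by a different algorithm:
-- collect the whole key stream, take the set difference with base, and recover
-- first-occurrence order by SORTING the new keys by their first index in the
-- stream; objective: alternative, same result, not faster.

-- ===== PORT A =====
-- seen = set(base); out = list(base); for r in rows: for k in r.keys(): if k not in seen: seen.add(k); out.append(k)
-- (a dict's keys() yields each key once, in first-insertion order: dedup of the pair list's firsts)
def dynamic_headers_py (rows : List (List (String × String))) (base : List String) : List String :=
  (rows.foldl
    (fun st r =>
      (PySem.List.dedup (r.map Prod.fst)).foldl
        (fun st k =>
          if !(PySem.Set.contains st.1 k) then (PySem.Set.add st.1 k, st.2 ++ [k]) else st)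
        st)
    (PySem.Set.ofList base, base)).2

-- ===== PORT B =====
-- flat = [k for r in rows for k in r]; new = set(flat).difference(base); return list(base) + sorted(new, key=flat.index)
-- flat.index(k) in Python raises on absent k; every k in new is in flat, so the
-- Option is always some — ported as (index? flat k).getD 0. The sort key is
-- injective on the set (distinct keys have distinct first indices), so the
-- result does not depend on the set's iteration order.
def dynamic_headers_py_alt (rows : List (List (String × String))) (base : List String) : List String :=
  let flat := rows.flatMap (fun r => PySem.List.dedup (r.map Prod.fst))
  let new := PySem.Set.diff (PySem.Set.ofList flat) base
  base ++ PySem.List.sorted new (fun k => (PySem.List.index? flat k).getD 0) false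

-- ===== PRECONDITION & SPEC =====
def Spec_dynamic_headers_py (rows : List (List (String × String))) (base : List String) (out : List String) : Prop := out = dynamic_headers_py_alt rows base
instance (rows : List (List (String × String))) (base : List String) (out : List String) : Decidable (Spec_dynamic_headers_py rows base out) := by unfold Spec_dynamic_headers_py; infer_instance

-- ===== CLAIM (what is proved, stated in full; the proofs are below) =====
def Claim_equal_dynamic_headers_py : Prop := ∀ (rows : List (List (String × String))) (base : List String), Dom_dynamic_headers_py rows base → Spec_dynamic_headers_py rows base (dynamic_headers_py rows base)

-- ===== LEMMAS AND PROOFS =====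

-- A's inner loop over a key list, from state (s, out), appends exactly the keys
-- that Set.update s ks appends, and returns that updated set.
theorem pvFoldA (ks : List String) : ∀ (s : PySem.Set String) (out : List String),
    ks.foldl
      (fun st k =>
        if !(PySem.Set.contains st.1 k) then (PySem.Set.add st.1 k, st.2 ++ [k]) else st)
      (s, out)
    = (PySem.Set.update s ks, out ++ (PySem.Set.update s ks).drop s.length) := by
  induction ks with
  | nil =>
    intro s out
    simp [PySem.Set.update_nil]
  | cons k ks ih =>
    intro s out
    rw [List.foldl_cons, PySem.Set.update_cons]
    by_cases h : k ∈ s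
    · have hc : PySem.Set.contains s k = true := (PySem.Set.contains_iff s k).mpr h
      simp only [hc, Bool.not_true, if_false, Bool.false_eq_true]
      rw [PySem.Set.add_of_mem h]
      exact ih s out
    · have hc : PySem.Set.contains s k = false := by
        cases hc' : PySem.Set.contains s k
        · rfl
        · exact absurd ((PySem.Set.contains_iff s k).mp hc') h
      simp only [hc, Bool.not_false, if_true]
      rw [PySem.Set.add_of_not_mem h]
      rw [ih (s ++ [k]) (out ++ [k])]
      have hU : PySem.Set.update (s ++ [k]) ks
          = (s ++ [k]) ++ (PySem.Set.ofList ks).filter (fun y => !(PySem.Set.contains (s ++ [k]) y)) :=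
        PySem.Set.update_eq_append_filter ..
      simp only [Prod.mk.injEq, true_and]
      have h1 : ((s ++ ([k] ++ (PySem.Set.ofList ks).filter
            (fun y => !(PySem.Set.contains (s ++ [k]) y)))).drop s.length)
            = [k] ++ (PySem.Set.ofList ks).filter (fun y => !(PySem.Set.contains (s ++ [k]) y)) :=
          List.drop_left ..
      have h2 : (((s ++ [k]) ++ (PySem.Set.ofList ks).filter
            (fun y => !(PySem.Set.contains (s ++ [k]) y))).drop (s ++ [k]).length)
            = (PySem.Set.ofList ks).filter (fun y => !(PySem.Set.contains (s ++ [k]) y)) :=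
          List.drop_left ..
      rw [hU, h2, List.append_assoc s [k], h1]
      simp [List.append_assoc]

-- The distinct elements of xs, in first-occurrence order, have strictly
-- increasing first indices in xs.
theorem pvKeyMono (xs : List String) :
    (PySem.Set.ofList xs).Pairwise
      (fun a b => (PySem.List.index? xs a).getD 0 < (PySem.List.index? xs b).getD 0) := by
  induction xs with
  | nil => simp [PySem.Set.ofList_nil]
  | cons x xs ih =>
    rw [PySem.Set.ofList_cons]
    constructor
    · intro b hb
      have hb' := (PySem.Set.mem_discard ..).mp hb
      have hbx : x ≠ b := fun h => hb'.2 h.symm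
      have hbxs : b ∈ xs := (PySem.Set.mem_ofList ..).mp hb'.1
      obtain ⟨k, hk⟩ := Option.isSome_iff_exists.mp ((PySem.List.index?_isSome_iff ..).mpr hbxs)
      rw [PySem.List.index?_cons_self, PySem.List.index?_cons_of_ne _ hbx, hk]
      simp
    · have hsub : (PySem.Set.discard (PySem.Set.ofList xs) x).Sublist (PySem.Set.ofList xs) := by
        simp [PySem.Set.discard]
      refine ((ih.sublist hsub).imp_of_mem ?_)
      intro a b ha hb hab
      have hax : x ≠ a := fun h => ((PySem.Set.mem_discard ..).mp ha).2 h.symm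
      have hbx : x ≠ b := fun h => ((PySem.Set.mem_discard ..).mp hb).2 h.symm
      have haxs : a ∈ xs := (PySem.Set.mem_ofList ..).mp ((PySem.Set.mem_discard ..).mp ha).1
      have hbxs : b ∈ xs := (PySem.Set.mem_ofList ..).mp ((PySem.Set.mem_discard ..).mp hb).1
      obtain ⟨ka, hka⟩ := Option.isSome_iff_exists.mp ((PySem.List.index?_isSome_iff ..).mpr haxs)
      obtain ⟨kb, hkb⟩ := Option.isSome_iff_exists.mp ((PySem.List.index?_isSome_iff ..).mpr hbxs)
      rw [PySem.List.index?_cons_of_ne _ hax, PySem.List.index?_cons_of_ne _ hbx, hka, hkb]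
      rw [hka, hkb] at hab
      simpa using hab

-- ===== VERDICT (by name: the statement is the Claim_ definition above) =====
theorem dynamic_headers_py_spec : Claim_equal_dynamic_headers_py := by
  intro rows base _
  show dynamic_headers_py rows base = dynamic_headers_py_alt rows base
  have hA : dynamic_headers_py rows base
      = base ++ (PySem.Set.ofList (rows.flatMap (fun r => PySem.List.dedup (r.map Prod.fst)))).filter
          (fun y => !(PySem.Set.contains (PySem.Set.ofList base) y)) := by
    unfold dynamic_headers_py
    rw [← List.foldl_flatMap, pvFoldA, PySem.Set.update_eq_append_filter, List.drop_left]
  rw [hA]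
  show _ = base ++ PySem.List.sorted _ _ false
  congr 1
  -- the filtered first-occurrence list IS sorted(new, key=first index)
  refine Eq.symm (PySem.List.sorted_eq_of_perm_of_pairwise_lt _ _ _ ?_ ?_)
  · -- same members, both Nodup ⇒ Perm
    refine (List.perm_ext_iff_of_nodup ?_ ?_).mpr ?_
    · exact (PySem.Set.nodup_ofList _).filter _
    · exact PySem.Set.nodup_diff _ _ (PySem.Set.nodup_ofList _)
    · intro y
      constructor
      · intro h
        have h' := List.mem_filter.mp h
        refine (PySem.Set.mem_diff ..).mpr ⟨h'.1, ?_⟩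
        have := h'.2
        simp only [PySem.Set.contains_eq_listContains, Bool.not_eq_eq_eq_not, Bool.not_true,
          List.contains_eq_mem, decide_eq_false_iff_not] at this
        simpa [PySem.Set.mem_ofList] using this
      · intro h
        have h' := (PySem.Set.mem_diff ..).mp h
        refine List.mem_filter.mpr ⟨h'.1, ?_⟩
        simp only [PySem.Set.contains_eq_listContains, Bool.not_eq_eq_eq_not, Bool.not_true,
          List.contains_eq_mem, decide_eq_false_iff_not]
        simpa [PySem.Set.mem_ofList] using h'.2
  · exact List.Pairwise.sublist List.filter_sublist (pvKeyMono _)
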